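-- pv_equiv track=rewrite | github.com/gabay/AoC2024 | q6.py | get_pos_and_direction
-- ===== SOURCE A (Python) =====
-- UP = 1
--
-- DOWN = 2
--
-- LEFT = 3
--
-- RIGHT = 4
--
-- def get_pos_and_direction(board: list[str]) -> tuple[int, int, int]:
--     for y, row in enumerate(board):
--         for x, cell in enumerate(row):
--             match cell:
--                 case "^":
--                     return x, y, UP
--                 case "v":
--                     return x, y, DOWN
--                 case "<":
--                     return x, y, LEFT
--                 case ">":
--                     return x, y, RIGHT
--     raise RuntimeError(board)
-- ===== SOURCE B (Python) =====
-- UP = 1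
-- DOWN = 2
-- LEFT = 3
-- RIGHT = 4
--
-- def get_pos_and_direction(board: list[str]) -> tuple[int, int, int]:
--     # Staged search: run one independent search per marker character
--     # (str.find per row, stopping at the first row containing it), then
--     # take the lexicographically smallest (y, x) candidate, which is the
--     # row-major-first marker.
--     best = None
--     for ch, d in (("^", UP), ("v", DOWN), ("<", LEFT), (">", RIGHT)):
--         for y, row in enumerate(board):
--             x = row.find(ch)
--             if x != -1:
--                 if best is None or (y, x) < best[:2]:
--                     best = (y, x, d)
--                 break
--     if best is None:
--         raise RuntimeError(board)
--     y, x, d = best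
--     return x, y, d
-- ===== Notes on version B (the rewrite author's own statement) =====
-- stated objective: alternative
-- what changed: Replaces A's single nested row-major scan with four staged searches (one per marker character via per-row str.find with early break) whose results are combined by a lexicographic (y, x) argmin; correct because the row-major-first marker is the lex-min of the per-character first occurrences.
import Mathlib
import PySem

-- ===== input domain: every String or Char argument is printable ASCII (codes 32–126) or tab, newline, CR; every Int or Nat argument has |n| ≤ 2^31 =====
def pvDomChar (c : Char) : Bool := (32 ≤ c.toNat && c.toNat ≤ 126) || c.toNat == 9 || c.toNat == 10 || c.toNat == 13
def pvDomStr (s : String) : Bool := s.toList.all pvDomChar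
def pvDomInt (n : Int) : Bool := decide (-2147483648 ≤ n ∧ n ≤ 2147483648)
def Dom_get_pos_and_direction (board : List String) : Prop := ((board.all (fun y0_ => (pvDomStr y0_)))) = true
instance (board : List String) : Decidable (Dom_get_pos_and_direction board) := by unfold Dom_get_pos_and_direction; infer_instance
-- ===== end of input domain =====

-- B runs four staged per-character searches (str.find per row, break at first hit)
-- and combines them by a lexicographic (y, x) argmin, instead of A's single nested
-- row-major scan (alternative decomposition, same cost).

-- ===== PORT A =====
-- inner 'for x, cell in enumerate(row)' with the four-way match
def pvA_row : List Char → Int → Int → Option (Int × Int × Int)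
  | [], _, _ => none
  | c :: cs, x, y =>
    if c = '^' then some (x, y, 1)
    else if c = 'v' then some (x, y, 2)
    else if c = '<' then some (x, y, 3)
    else if c = '>' then some (x, y, 4)
    else pvA_row cs (x + 1) y

-- outer 'for y, row in enumerate(board)'
def pvA_scan : List (List Char) → Int → Option (Int × Int × Int)
  | [], _ => none
  | r :: rs, y =>
    match pvA_row r 0 y with
    | some o => some o
    | none => pvA_scan rs (y + 1)

-- the final 'raise RuntimeError(board)' is the 'none' case, excluded by Pre_
def get_pos_and_direction (board : List String) : Int × Int × Int :=
  (pvA_scan (board.map String.toList) 0).getD (0, 0, 0)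

-- ===== PORT B =====
-- inner 'for y, row in enumerate(board): x = row.find(ch); if x != -1: … break'
-- row.find(ch) for a single character ch is exactly List.idxOf?: 'some n' is
-- find = n, 'none' is find = -1 (exact on all inputs).
def pvB_find (c : Char) : List (List Char) → Int → Option (Int × Int)
  | [], _ => none
  | r :: rs, y =>
    match List.idxOf? c r with
    | some n => some (y, (n : Int))
    | none => pvB_find c rs (y + 1)

-- 'if best is None or (y, x) < best[:2]: best = (y, x, d)' (tuple lex compare)
def pvB_step (rows : List (List Char)) (best : Option (Int × Int × Int))
    (cd : Char × Int) : Option (Int × Int × Int) :=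
  match pvB_find cd.1 rows 0 with
  | none => best
  | some (y, x) =>
    match best with
    | none => some (y, x, cd.2)
    | some b => if y < b.1 ∨ (y = b.1 ∧ x < b.2.1) then some (y, x, cd.2) else some b

-- the final 'raise RuntimeError(board)' is the 'none' case, excluded by Pre_
def get_pos_and_direction_alt (board : List String) : Int × Int × Int :=
  match [('^', (1 : Int)), ('v', 2), ('<', 3), ('>', 4)].foldl
      (pvB_step (board.map String.toList)) none with
  | some (y, x, d) => (x, y, d)
  | none => (0, 0, 0)

-- ===== PRECONDITION & SPEC =====
-- Pre_ excludes exactly the boards with no marker cell, on which the Python A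
-- raises RuntimeError (and B does too).
def Pre_get_pos_and_direction (board : List String) : Prop :=
  (board.any (fun r => r.toList.any
    (fun c => c == '^' || c == 'v' || c == '<' || c == '>'))) = true
instance (board : List String) : Decidable (Pre_get_pos_and_direction board) := by
  unfold Pre_get_pos_and_direction; infer_instance

def pvWitness_get_pos_and_direction : List String := ["^"]

def Spec_get_pos_and_direction (board : List String) (out : Int × Int × Int) : Prop := out = get_pos_and_direction_alt board
instance (board : List String) (out : Int × Int × Int) : Decidable (Spec_get_pos_and_direction board out) := by unfold Spec_get_pos_and_direction; infer_instance

-- ===== CLAIM (what is proved, stated in full; the proofs are below) =====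
def Claim_equal_get_pos_and_direction : Prop := ∀ (board : List String), Dom_get_pos_and_direction board → Pre_get_pos_and_direction board → Spec_get_pos_and_direction board (get_pos_and_direction board)

-- ===== LEMMAS AND PROOFS =====

-- a candidate as B's step sees it: (y, x, direction)
def pvCand (c : Char) (d : Int) (rows : List (List Char)) (y : Int) :
    Option (Int × Int × Int) :=
  (pvB_find c rows y).map (fun p => (p.1, p.2, d))

-- B's step expressed on a precomputed candidate
def pvStepO (best o : Option (Int × Int × Int)) : Option (Int × Int × Int) :=
  match o with
  | none => best
  | some v =>
    match best with
    | none => some v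
    | some b => if v.1 < b.1 ∨ (v.1 = b.1 ∧ v.2.1 < b.2.1) then some v else some b

theorem pvB_step_eq (rows : List (List Char)) (best : Option (Int × Int × Int))
    (cd : Char × Int) : pvB_step rows best cd = pvStepO best (pvCand cd.1 cd.2 rows 0) := by
  unfold pvB_step pvStepO pvCand
  cases pvB_find cd.1 rows 0 with
  | none => rfl
  | some p => rfl

-- the candidate of char c in a cons'ed board, with x offset for row recursion
def pvRowCand (r : List Char) (rs : List (List Char)) (y x : Int)
    (c : Char) (d : Int) : Option (Int × Int × Int) :=
  match List.idxOf? c r with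
  | some n => some (y, x + (n : Int), d)
  | none => pvCand c d rs (y + 1)

def pvG (rows : List (List Char)) (y : Int) : Option (Int × Int × Int) :=
  pvStepO (pvStepO (pvStepO (pvStepO none (pvCand '^' 1 rows y))
    (pvCand 'v' 2 rows y)) (pvCand '<' 3 rows y)) (pvCand '>' 4 rows y)

def pvH (r : List Char) (rs : List (List Char)) (y x : Int) : Option (Int × Int × Int) :=
  pvStepO (pvStepO (pvStepO (pvStepO none (pvRowCand r rs y x '^' 1))
    (pvRowCand r rs y x 'v' 2)) (pvRowCand r rs y x '<' 3)) (pvRowCand r rs y x '>' 4)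

theorem pvB_find_ge (c : Char) (rows : List (List Char)) (y : Int)
    (p : Int × Int) (h : pvB_find c rows y = some p) : y ≤ p.1 := by
  induction rows generalizing y with
  | nil => simp [pvB_find] at h
  | cons r rs ih =>
    unfold pvB_find at h
    cases hix : List.idxOf? c r with
    | some n =>
      rw [hix] at h
      obtain ⟨p1, p2⟩ := p
      simp only [Option.some.injEq, Prod.mk.injEq] at h
      omega
    | none =>
      rw [hix] at h
      have := ih (y + 1) h
      omega

-- any candidate coming from pvRowCand at offset x is at (y, ≥ x) or strictly below
theorem pvRowCand_shape (r : List Char) (rs : List (List Char)) (y x : Int)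
    (c : Char) (d : Int) (v : Int × Int × Int) (h : pvRowCand r rs y x c d = some v) :
    (v.1 = y ∧ x ≤ v.2.1) ∨ y + 1 ≤ v.1 := by
  unfold pvRowCand at h
  cases hix : List.idxOf? c r with
  | some n =>
    rw [hix] at h
    obtain ⟨v1, v2, v3⟩ := v
    simp only [Option.some.injEq, Prod.mk.injEq] at h
    left
    have : (0 : Int) ≤ (n : Int) := Int.natCast_nonneg n
    constructor <;> simp <;> omega
  | none =>
    rw [hix] at h
    unfold pvCand at h
    cases hf : pvB_find c rs (y + 1) with
    | none => rw [hf] at h; simp at h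
    | some p =>
      rw [hf] at h
      simp only [Option.map_some, Option.some.injEq] at h
      have := pvB_find_ge c rs (y + 1) p hf
      right
      rw [← h]
      omega

-- a shaped candidate never beats (y, x, ·) ...
theorem pvNoBeat (y x d0 : Int) (v : Int × Int × Int)
    (hs : (v.1 = y ∧ x + 1 ≤ v.2.1) ∨ y + 1 ≤ v.1) :
    ¬ (v.1 < ((y, x, d0) : Int × Int × Int).1 ∨
       (v.1 = ((y, x, d0) : Int × Int × Int).1 ∧ v.2.1 < ((y, x, d0) : Int × Int × Int).2.1)) := by
  obtain ⟨v1, v2, v3⟩ := v; simp at hs ⊢; omega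

-- ... and (y, x, ·) strictly beats any shaped candidate
theorem pvBeats (y x d0 : Int) (u : Int × Int × Int)
    (hs : (u.1 = y ∧ x + 1 ≤ u.2.1) ∨ y + 1 ≤ u.1) :
    ((y, x, d0) : Int × Int × Int).1 < u.1 ∨
      (((y, x, d0) : Int × Int × Int).1 = u.1 ∧ ((y, x, d0) : Int × Int × Int).2.1 < u.2.1) := by
  obtain ⟨u1, u2, u3⟩ := u; simp at hs ⊢; omega

theorem pvStepO_keep (b : Int × Int × Int) (o : Option (Int × Int × Int))
    (h : ∀ v, o = some v → ¬ (v.1 < b.1 ∨ (v.1 = b.1 ∧ v.2.1 < b.2.1))) :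
    pvStepO (some b) o = some b := by
  cases o with
  | none => rfl
  | some v => simp [pvStepO, h v rfl]

theorem pvStepO_win (b : Option (Int × Int × Int)) (v : Int × Int × Int)
    (h : ∀ u, b = some u → (v.1 < u.1 ∨ (v.1 = u.1 ∧ v.2.1 < u.2.1))) :
    pvStepO b (some v) = some v := by
  cases b with
  | none => rfl
  | some u => simp [pvStepO, h u rfl]

-- the result of a step came from one of its two inputs
theorem pvStepO_some (b o : Option (Int × Int × Int)) (u : Int × Int × Int)
    (h : pvStepO b o = some u) : b = some u ∨ o = some u := by
  cases o with
  | none => left; exact h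
  | some v =>
    cases b with
    | none => right; exact h
    | some w =>
      have e : pvStepO (some w) (some v)
          = if v.1 < w.1 ∨ (v.1 = w.1 ∧ v.2.1 < w.2.1) then some v else some w := rfl
      rw [e] at h
      split at h
      · right; exact h
      · left; exact h

-- head char not equal to c: the candidate just shifts the x offset
theorem pvRowCand_cons (a : Char) (as : List Char) (rs : List (List Char))
    (y x : Int) (c : Char) (d : Int) (hne : ¬ a == c) :
    pvRowCand (a :: as) rs y x c d = pvRowCand as rs y (x + 1) c d := by
  unfold pvRowCand
  rw [List.idxOf?_cons]
  simp only [hne]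
  cases hix : List.idxOf? c as with
  | none => simp
  | some n =>
    have hx : x + ((n : Int) + 1) = x + 1 + (n : Int) := by ring
    simp [hx]

theorem pvRowCand_self (a : Char) (as : List Char) (rs : List (List Char))
    (y x : Int) (c : Char) (d : Int) (he : a = c) :
    pvRowCand (a :: as) rs y x c d = some (y, x, d) := by
  unfold pvRowCand
  rw [List.idxOf?_cons]
  simp [he]

-- main row lemma: B's four-candidate fold on r :: rs computes A's inner row scan
theorem pvH_row (r : List Char) (rs : List (List Char)) (y x : Int) :
    pvH r rs y x =
      match pvA_row r x y with
      | some q => some (q.2.1, q.1, q.2.2)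
      | none => pvG rs (y + 1) := by
  induction r generalizing x with
  | nil =>
    simp [pvH, pvG, pvRowCand, pvCand, pvA_row, List.idxOf?]
  | cons a as ih =>
    by_cases h1 : a = '^'
    · have k2 : ¬ a == 'v' := by simp [h1]
      have k3 : ¬ a == '<' := by simp [h1]
      have k4 : ¬ a == '>' := by simp [h1]
      unfold pvH
      rw [pvRowCand_self a as rs y x '^' 1 h1,
        pvRowCand_cons a as rs y x 'v' 2 k2,
        pvRowCand_cons a as rs y x '<' 3 k3,
        pvRowCand_cons a as rs y x '>' 4 k4]
      have step1 : pvStepO none (some (y, x, (1:Int))) = some (y, x, 1) := rfl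
      rw [step1,
        pvStepO_keep _ _ (fun v hv =>
          pvNoBeat y x 1 v (pvRowCand_shape as rs y (x+1) 'v' 2 v hv)),
        pvStepO_keep _ _ (fun v hv =>
          pvNoBeat y x 1 v (pvRowCand_shape as rs y (x+1) '<' 3 v hv)),
        pvStepO_keep _ _ (fun v hv =>
          pvNoBeat y x 1 v (pvRowCand_shape as rs y (x+1) '>' 4 v hv))]
      simp [pvA_row, h1]
    · by_cases h2 : a = 'v'
      · have k1 : ¬ a == '^' := by simp [h2]
        have k3 : ¬ a == '<' := by simp [h2]
        have k4 : ¬ a == '>' := by simp [h2]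
        unfold pvH
        rw [pvRowCand_self a as rs y x 'v' 2 h2,
          pvRowCand_cons a as rs y x '^' 1 k1,
          pvRowCand_cons a as rs y x '<' 3 k3,
          pvRowCand_cons a as rs y x '>' 4 k4]
        rw [pvStepO_win _ (y, x, (2:Int)) (fun u hu => by
          rcases pvStepO_some _ _ _ hu with hu' | hu'
          · exact absurd hu' (by simp [pvStepO])
          · exact pvBeats y x 2 u (pvRowCand_shape as rs y (x+1) '^' 1 u hu')),
          pvStepO_keep _ _ (fun v hv =>
            pvNoBeat y x 2 v (pvRowCand_shape as rs y (x+1) '<' 3 v hv)),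
          pvStepO_keep _ _ (fun v hv =>
            pvNoBeat y x 2 v (pvRowCand_shape as rs y (x+1) '>' 4 v hv))]
        simp [pvA_row, h1, h2]
      · by_cases h3 : a = '<'
        · have k1 : ¬ a == '^' := by simp [h3]
          have k2 : ¬ a == 'v' := by simp [h3]
          have k4 : ¬ a == '>' := by simp [h3]
          unfold pvH
          rw [pvRowCand_self a as rs y x '<' 3 h3,
            pvRowCand_cons a as rs y x '^' 1 k1,
            pvRowCand_cons a as rs y x 'v' 2 k2,
            pvRowCand_cons a as rs y x '>' 4 k4]
          rw [pvStepO_win _ (y, x, (3:Int)) (fun u hu => by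
            rcases pvStepO_some _ _ _ hu with hu' | hu'
            · rcases pvStepO_some _ _ _ hu' with hu'' | hu''
              · exact absurd hu'' (by simp [pvStepO])
              · exact pvBeats y x 3 u (pvRowCand_shape as rs y (x+1) '^' 1 u hu'')
            · exact pvBeats y x 3 u (pvRowCand_shape as rs y (x+1) 'v' 2 u hu')),
            pvStepO_keep _ _ (fun v hv =>
              pvNoBeat y x 3 v (pvRowCand_shape as rs y (x+1) '>' 4 v hv))]
          simp [pvA_row, h1, h2, h3]
        · by_cases h4 : a = '>'
          · have k1 : ¬ a == '^' := by simp [h4]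
            have k2 : ¬ a == 'v' := by simp [h4]
            have k3 : ¬ a == '<' := by simp [h4]
            unfold pvH
            rw [pvRowCand_self a as rs y x '>' 4 h4,
              pvRowCand_cons a as rs y x '^' 1 k1,
              pvRowCand_cons a as rs y x 'v' 2 k2,
              pvRowCand_cons a as rs y x '<' 3 k3]
            rw [pvStepO_win _ (y, x, (4:Int)) (fun u hu => by
              rcases pvStepO_some _ _ _ hu with hu' | hu'
              · rcases pvStepO_some _ _ _ hu' with hu'' | hu''
                · rcases pvStepO_some _ _ _ hu'' with hu3 | hu3
                  · exact absurd hu3 (by simp [pvStepO])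
                  · exact pvBeats y x 4 u (pvRowCand_shape as rs y (x+1) '^' 1 u hu3)
                · exact pvBeats y x 4 u (pvRowCand_shape as rs y (x+1) 'v' 2 u hu'')
              · exact pvBeats y x 4 u (pvRowCand_shape as rs y (x+1) '<' 3 u hu'))]
            simp [pvA_row, h1, h2, h3, h4]
          · have k1 : ¬ a == '^' := by simp [h1]
            have k2 : ¬ a == 'v' := by simp [h2]
            have k3 : ¬ a == '<' := by simp [h3]
            have k4 : ¬ a == '>' := by simp [h4]
            unfold pvH
            rw [pvRowCand_cons a as rs y x '^' 1 k1,
              pvRowCand_cons a as rs y x 'v' 2 k2,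
              pvRowCand_cons a as rs y x '<' 3 k3,
              pvRowCand_cons a as rs y x '>' 4 k4]
            have := ih (x + 1)
            unfold pvH at this
            rw [this]
            simp [pvA_row, h1, h2, h3, h4]

theorem pvCand_cons (c : Char) (d : Int) (r : List Char) (rs : List (List Char))
    (y : Int) : pvCand c d (r :: rs) y = pvRowCand r rs y 0 c d := by
  unfold pvCand pvRowCand pvB_find
  cases hix : List.idxOf? c r with
  | none => simp [hix, pvCand]
  | some n => simp [hix]

-- main lemma: B's staged argmin equals A's row-major scan (with coordinates swapped)
theorem pvG_scan (rows : List (List Char)) (y : Int) :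
    pvG rows y =
      match pvA_scan rows y with
      | some q => some (q.2.1, q.1, q.2.2)
      | none => none := by
  induction rows generalizing y with
  | nil => simp [pvG, pvCand, pvB_find, pvA_scan, pvStepO]
  | cons r rs ih =>
    have hG : pvG (r :: rs) y = pvH r rs y 0 := by
      unfold pvG pvH
      rw [pvCand_cons, pvCand_cons, pvCand_cons, pvCand_cons]
    rw [hG, pvH_row]
    cases hr : pvA_row r 0 y with
    | some q => simp [pvA_scan, hr]
    | none => simp [pvA_scan, hr, ih]

-- ===== VERDICT (by name: the statement is the Claim_ definition above) =====
theorem get_pos_and_direction_spec : Claim_equal_get_pos_and_direction := by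
  intro board _ _
  unfold Spec_get_pos_and_direction get_pos_and_direction get_pos_and_direction_alt
  have hfold : [('^', (1 : Int)), ('v', 2), ('<', 3), ('>', 4)].foldl
      (pvB_step (board.map String.toList)) none
      = pvG (board.map String.toList) 0 := by
    simp only [List.foldl, pvB_step_eq]
    rfl
  rw [hfold, pvG_scan]
  cases h : pvA_scan (board.map String.toList) 0 with
  | none => rfl
  | some q => rfl
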